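-- pv_equiv track=rewrite | github.com/miikeyanderson/data-center-bas-sim-main | src/diagnostics/reports.py | _organize_maintenance_schedule
-- ===== SOURCE A (Python) =====
-- from typing import Dict, List, Optional, Any, TextIO
--
-- def _organize_maintenance_schedule(maintenance_actions: List[Dict[str, Any]]) -> Dict[str, List[Dict[str, Any]]]:
--     """Organize maintenance actions into time-based schedule."""
--
--     schedule = {
--         'immediate': [],
--         'this_week': [],
--         'this_month': [],
--         'this_quarter': []
--     }
--
--     for action in maintenance_actions:
--         priority = action.get('priority', 'medium')
--
--         if priority == 'immediate':
--             schedule['immediate'].append(action)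
--         elif priority in ['urgent', 'high']:
--             schedule['this_week'].append(action)
--         elif priority == 'medium':
--             schedule['this_month'].append(action)
--         else:
--             schedule['this_quarter'].append(action)
--
--     return schedule
-- ===== SOURCE B (Python) =====
-- PRIORITY_TO_BUCKET = {'immediate': 'immediate', 'urgent': 'this_week',
--                       'high': 'this_week', 'medium': 'this_month'}
--
--
-- def _bucket(action):
--     return PRIORITY_TO_BUCKET.get(action.get('priority', 'medium'), 'this_quarter')
--
--
-- def _organize_maintenance_schedule(maintenance_actions):
--     return {b: [a for a in maintenance_actions if _bucket(a) == b]
--             for b in ('immediate', 'this_week', 'this_month', 'this_quarter')}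
-- ===== Notes on version B (the rewrite author's own statement) =====
-- stated objective: simpler
-- what changed: Replaces A's single append-per-action loop with branch chain by a bucket-classification function plus a dict comprehension of per-bucket filter passes over the input.
import Mathlib
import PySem

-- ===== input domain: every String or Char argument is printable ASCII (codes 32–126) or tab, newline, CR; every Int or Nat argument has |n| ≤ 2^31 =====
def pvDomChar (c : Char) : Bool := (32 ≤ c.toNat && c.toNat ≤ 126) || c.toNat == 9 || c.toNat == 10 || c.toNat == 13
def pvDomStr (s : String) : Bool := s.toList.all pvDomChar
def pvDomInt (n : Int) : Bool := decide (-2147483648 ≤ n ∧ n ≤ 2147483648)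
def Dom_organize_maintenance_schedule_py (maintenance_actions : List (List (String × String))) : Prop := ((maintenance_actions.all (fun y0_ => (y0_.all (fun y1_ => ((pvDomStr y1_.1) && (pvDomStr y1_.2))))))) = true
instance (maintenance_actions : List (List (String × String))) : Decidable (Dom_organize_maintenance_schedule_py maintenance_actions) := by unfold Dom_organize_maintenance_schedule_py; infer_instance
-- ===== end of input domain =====

-- B replaces A's single append-per-action loop having an if/elif branch chain by a
-- bucket-classification function and four per-bucket filter passes (simpler decomposition).


-- ===== PORT A =====
-- the loop body of A: dispatch on priority, append the action to the matching bucket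
def pvStepA (schedule : PySem.Dict String (List (List (String × String))))
    (action : List (String × String)) : PySem.Dict String (List (List (String × String))) :=
  let priority := (PySem.Dict.mk action).getD "priority" "medium"
  if priority = "immediate" then schedule.modify "immediate" [] (· ++ [action])
  else if priority = "urgent" ∨ priority = "high" then schedule.modify "this_week" [] (· ++ [action])
  else if priority = "medium" then schedule.modify "this_month" [] (· ++ [action])
  else schedule.modify "this_quarter" [] (· ++ [action])

def organize_maintenance_schedule_py (maintenance_actions : List (List (String × String))) : List (String × List (List (String × String))) :=
  let schedule : PySem.Dict String (List (List (String × String))) :=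
    PySem.Dict.mk [("immediate", []), ("this_week", []), ("this_month", []), ("this_quarter", [])]
  (maintenance_actions.foldl pvStepA schedule).items

-- ===== PORT B =====
-- the static PRIORITY_TO_BUCKET mapping of Source B
def pvPriorityToBucket : PySem.Dict String String :=
  PySem.Dict.mk [("immediate", "immediate"), ("urgent", "this_week"),
                 ("high", "this_week"), ("medium", "this_month")]

def pvBucket (action : List (String × String)) : String :=
  pvPriorityToBucket.getD ((PySem.Dict.mk action).getD "priority" "medium") "this_quarter"

def organize_maintenance_schedule_py_alt (maintenance_actions : List (List (String × String))) : List (String × List (List (String × String))) :=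
  ["immediate", "this_week", "this_month", "this_quarter"].map
    (fun b => (b, maintenance_actions.filter (fun a => pvBucket a == b)))

-- ===== PRECONDITION & SPEC =====
def Spec_organize_maintenance_schedule_py (maintenance_actions : List (List (String × String))) (out : List (String × List (List (String × String)))) : Prop := out = organize_maintenance_schedule_py_alt maintenance_actions
instance (maintenance_actions : List (List (String × String))) (out : List (String × List (List (String × String)))) : Decidable (Spec_organize_maintenance_schedule_py maintenance_actions out) := by unfold Spec_organize_maintenance_schedule_py; infer_instance

-- ===== CLAIM (what is proved, stated in full; the proofs are below) =====
def Claim_equal_organize_maintenance_schedule_py : Prop := ∀ (maintenance_actions : List (List (String × String))), Dom_organize_maintenance_schedule_py maintenance_actions → Spec_organize_maintenance_schedule_py maintenance_actions (organize_maintenance_schedule_py maintenance_actions)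

-- ===== LEMMAS AND PROOFS =====

-- loop invariant: folding A's step over t from a 4-bucket dict appends, to each bucket,
-- exactly the actions of t that B classifies into that bucket
theorem pvFoldA_items (t : List (List (String × String)))
    (i w m q : List (List (String × String))) :
    (t.foldl pvStepA (PySem.Dict.mk
        [("immediate", i), ("this_week", w), ("this_month", m), ("this_quarter", q)])).items
    = [("immediate", i ++ t.filter (fun a => pvBucket a == "immediate")),
       ("this_week", w ++ t.filter (fun a => pvBucket a == "this_week")),
       ("this_month", m ++ t.filter (fun a => pvBucket a == "this_month")),
       ("this_quarter", q ++ t.filter (fun a => pvBucket a == "this_quarter"))] := by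
  induction t generalizing i w m q with
  | nil => simp
  | cons a t ih =>
    have hstep : ∀ sch, List.foldl pvStepA sch (a :: t) = List.foldl pvStepA (pvStepA sch a) t := by
      intro sch; rfl
    rw [hstep]
    by_cases h1 : (PySem.Dict.mk a).getD "priority" "medium" = "immediate"
    · have hb : pvBucket a = "immediate" := by
        simp only [pvBucket, pvPriorityToBucket, h1]; decide
      have hs : pvStepA (PySem.Dict.mk
            [("immediate", i), ("this_week", w), ("this_month", m), ("this_quarter", q)]) a
          = PySem.Dict.mk [("immediate", i ++ [a]), ("this_week", w), ("this_month", m),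
            ("this_quarter", q)] := by
        simp only [pvStepA]
        rw [if_pos h1]
        simp [PySem.Dict.modify, PySem.Dict.getD, PySem.Dict.get?, PySem.Dict.insert,
          PySem.Dict.contains, List.find?]
      rw [hs, ih]
      simp [hb]
    · by_cases h2 : (PySem.Dict.mk a).getD "priority" "medium" = "urgent" ∨
          (PySem.Dict.mk a).getD "priority" "medium" = "high"
      · have hb : pvBucket a = "this_week" := by
          rcases h2 with h2 | h2 <;> · simp only [pvBucket, pvPriorityToBucket, h2]; decide
        have hs : pvStepA (PySem.Dict.mk
              [("immediate", i), ("this_week", w), ("this_month", m), ("this_quarter", q)]) a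
            = PySem.Dict.mk [("immediate", i), ("this_week", w ++ [a]), ("this_month", m),
              ("this_quarter", q)] := by
          simp only [pvStepA]
          rw [if_neg h1, if_pos h2]
          simp [PySem.Dict.modify, PySem.Dict.getD, PySem.Dict.get?, PySem.Dict.insert,
            PySem.Dict.contains, List.find?]
        rw [hs, ih]
        simp [hb]
      · by_cases h3 : (PySem.Dict.mk a).getD "priority" "medium" = "medium"
        · have hb : pvBucket a = "this_month" := by
            simp only [pvBucket, pvPriorityToBucket, h3]; decide
          have hs : pvStepA (PySem.Dict.mk
                [("immediate", i), ("this_week", w), ("this_month", m), ("this_quarter", q)]) a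
              = PySem.Dict.mk [("immediate", i), ("this_week", w), ("this_month", m ++ [a]),
                ("this_quarter", q)] := by
            simp only [pvStepA]
            rw [if_neg h1, if_neg h2, if_pos h3]
            simp [PySem.Dict.modify, PySem.Dict.getD, PySem.Dict.get?, PySem.Dict.insert,
              PySem.Dict.contains, List.find?]
          rw [hs, ih]
          simp [hb]
        · have h2a : (PySem.Dict.mk a).getD "priority" "medium" ≠ "urgent" :=
            fun h => h2 (Or.inl h)
          have h2b : (PySem.Dict.mk a).getD "priority" "medium" ≠ "high" :=
            fun h => h2 (Or.inr h)
          have hb : pvBucket a = "this_quarter" := by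
            simp only [pvBucket, pvPriorityToBucket]
            set p := (PySem.Dict.mk a).getD "priority" "medium" with hp
            have e1 : ("immediate" == p) = false := beq_eq_false_iff_ne.mpr (Ne.symm h1)
            have e2 : ("urgent" == p) = false := beq_eq_false_iff_ne.mpr (Ne.symm h2a)
            have e3 : ("high" == p) = false := beq_eq_false_iff_ne.mpr (Ne.symm h2b)
            have e4 : ("medium" == p) = false := beq_eq_false_iff_ne.mpr (Ne.symm h3)
            simp [PySem.Dict.getD, PySem.Dict.get?, List.find?, e1, e2, e3, e4]
          have hs : pvStepA (PySem.Dict.mk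
                [("immediate", i), ("this_week", w), ("this_month", m), ("this_quarter", q)]) a
              = PySem.Dict.mk [("immediate", i), ("this_week", w), ("this_month", m),
                ("this_quarter", q ++ [a])] := by
            simp only [pvStepA]
            rw [if_neg h1, if_neg h2, if_neg h3]
            simp [PySem.Dict.modify, PySem.Dict.getD, PySem.Dict.get?, PySem.Dict.insert,
              PySem.Dict.contains, List.find?]
          rw [hs, ih]
          simp [hb]

-- ===== VERDICT (by name: the statement is the Claim_ definition above) =====
theorem organize_maintenance_schedule_py_spec : Claim_equal_organize_maintenance_schedule_py := by
  intro ma _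
  unfold Spec_organize_maintenance_schedule_py organize_maintenance_schedule_py
    organize_maintenance_schedule_py_alt
  rw [pvFoldA_items]
  simp
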